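-- pv_equiv track=rewrite | github.com/jamesBaker361/artbender-training | cyclegan/cycle_data_helper.py | equal_length
-- ===== SOURCE A (Python) =====
-- def equal_length(smaller, bigger):
--     if len(bigger) < len(smaller):
--         bigger, new_smaller = equal_length(bigger,smaller)
--     else:
--         new_smaller=[]
--         for i in range(len(bigger)):
--             new_smaller.append(smaller[i%len(smaller)])
--     return new_smaller, bigger
-- ===== SOURCE B (Python) =====
-- def equal_length(smaller, bigger):
--     if len(smaller) <= len(bigger):
--         n = len(bigger)
--         if n == 0:
--             return smaller, bigger
--         k = -(-n // len(smaller))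
--         return (smaller * k)[:n], bigger
--     else:
--         n = len(smaller)
--         k = -(-n // len(bigger))
--         return smaller, (bigger * k)[:n]
-- ===== Notes on version B (the rewrite author's own statement) =====
-- stated objective: simpler
-- what changed: Replaces A's recursive argument-swap and per-index modulo loop with a direct length comparison plus whole-list replication and a slice ((shorter * ceil(n/len)) [:n]).
import Mathlib
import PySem

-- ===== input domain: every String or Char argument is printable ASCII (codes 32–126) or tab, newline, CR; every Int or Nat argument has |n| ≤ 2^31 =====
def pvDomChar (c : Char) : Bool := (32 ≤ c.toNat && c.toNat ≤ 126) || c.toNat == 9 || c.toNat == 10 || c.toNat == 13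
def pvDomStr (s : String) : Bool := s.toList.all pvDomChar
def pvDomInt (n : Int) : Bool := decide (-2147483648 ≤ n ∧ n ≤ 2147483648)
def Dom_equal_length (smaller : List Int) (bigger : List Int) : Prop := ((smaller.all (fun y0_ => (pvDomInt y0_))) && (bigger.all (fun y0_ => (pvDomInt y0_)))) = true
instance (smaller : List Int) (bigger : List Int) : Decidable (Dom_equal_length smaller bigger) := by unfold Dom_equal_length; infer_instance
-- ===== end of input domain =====

-- B pads the shorter list by whole-list replication + slice instead of A's per-index modulo loop and recursive argument swap (objective: simpler).

-- ===== PORT A =====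
-- the loop 'for i in range(len(bigger)): new_smaller.append(smaller[i % len(smaller)])';
-- Nat '%' and getD are exact for Python's 'i % len(smaller)' indexing whenever smaller ≠ []
-- (i and the length are nonnegative); smaller = [] with bigger ≠ [] raises in Python and is outside Pre_.
def equal_length (smaller : List Int) (bigger : List Int) : List Int × List Int :=
  if bigger.length < smaller.length then
    -- 'bigger, new_smaller = equal_length(bigger, smaller)' then 'return new_smaller, bigger'
    let r := equal_length bigger smaller
    (r.2, r.1)
  else
    ((List.range bigger.length).foldl
      (fun acc i => acc ++ [smaller.getD (i % smaller.length) 0]) [], bigger)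
termination_by (if bigger.length < smaller.length then 1 else 0 : Nat)
decreasing_by split_ifs with h1 <;> omega

-- ===== PORT B =====
def equal_length_alt (smaller : List Int) (bigger : List Int) : List Int × List Int :=
  if smaller.length ≤ bigger.length then
    let n : Int := bigger.length
    if n = 0 then (smaller, bigger)
    else
      let k : Int := -(PySem.Int.floordiv (-n) smaller.length)   -- k = -(-n // len(smaller))
      (PySem.List.slice (PySem.List.pyRepeat smaller k) none (some n), bigger)  -- (smaller * k)[:n]
  else
    let n : Int := smaller.length
    let k : Int := -(PySem.Int.floordiv (-n) bigger.length)
    (smaller, PySem.List.slice (PySem.List.pyRepeat bigger k) none (some n))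

-- ===== PRECONDITION & SPEC =====
-- Pre_ excludes exactly the inputs where Python A raises ZeroDivisionError (one list empty, the other not); both programs raise there.
def Pre_equal_length (smaller : List Int) (bigger : List Int) : Prop := (smaller = [] ↔ bigger = [])
instance (smaller : List Int) (bigger : List Int) : Decidable (Pre_equal_length smaller bigger) := by unfold Pre_equal_length; infer_instance
def pvWitness_equal_length : List Int × List Int := ([1, 2], [3, 4, 5])

def Spec_equal_length (smaller : List Int) (bigger : List Int) (out : List Int × List Int) : Prop := out = equal_length_alt smaller bigger
instance (smaller : List Int) (bigger : List Int) (out : List Int × List Int) : Decidable (Spec_equal_length smaller bigger out) := by unfold Spec_equal_length; infer_instance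

-- ===== CLAIM (what is proved, stated in full; the proofs are below) =====
def Claim_equal_equal_length : Prop := ∀ (smaller : List Int) (bigger : List Int), Dom_equal_length smaller bigger → Pre_equal_length smaller bigger → Spec_equal_length smaller bigger (equal_length smaller bigger)

-- ===== LEMMAS AND PROOFS =====

-- one period of the cycle: indexing range (len s) by i % len s is just s
theorem map_mod_range_self (s : List Int) :
    (List.range s.length).map (fun i => s.getD (i % s.length) 0) = s := by
  apply List.ext_getElem
  · simp
  · intro j h1 h2
    simp [Nat.mod_eq_of_lt (by simpa using h1), List.getD_eq_getElem?_getD]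
    simp at h1
    simp [List.getElem?_eq_getElem h1]

-- k full periods of the modulo map are k concatenated copies of s
theorem map_mod_range_mul (s : List Int) (k : Nat) :
    (List.range (k * s.length)).map (fun i => s.getD (i % s.length) 0)
      = (List.replicate k s).flatten := by
  induction k with
  | zero => simp
  | succ k ih =>
    rw [Nat.succ_mul, List.range_add, List.replicate_succ', List.flatten_append]
    simp only [List.map_append, ih, List.map_map, List.flatten_cons, List.flatten_nil,
      List.append_nil]
    congr 1
    calc (List.range s.length).map ((fun i => s.getD (i % s.length) 0) ∘ (k * s.length + ·))
        = (List.range s.length).map (fun i => s.getD (i % s.length) 0) := by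
          apply List.map_congr_left
          intro i _
          simp [Function.comp]
      _ = s := map_mod_range_self s

-- ceiling division: k = -(-n // L) satisfies n ≤ k * L (and k = (n + L - 1) / L as a Nat)
theorem div_add_mod_int_aux (n L q r : Nat) (h : L * q + r = n + L - 1) (hm : r < L)
    (hL : 0 < L) : (q:Int) * L + (r:Int) = (n:Int) + L - 1 ∧ (r:Int) < (L:Int) := by
  constructor
  · have h' : ((L * q + r : Nat) : Int) = ((n + L - 1 : Nat) : Int) := by rw [h]
    push_cast [Nat.cast_sub (by omega : 1 ≤ n + L)] at h'
    linarith [h']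
  · exact_mod_cast hm

theorem div_add_mod_int (n L : Nat) (hL : 0 < L) :
    ((((n + L - 1) / L : Nat)) : Int) * L + (((n + L - 1) % L : Nat) : Int) = (n:Int) + L - 1
      ∧ (((n + L - 1) % L : Nat) : Int) < (L:Int) :=
  div_add_mod_int_aux n L _ _ (Nat.div_add_mod _ _) (Nat.mod_lt _ hL) hL

theorem ceil_spec (n L : Nat) (hL : 0 < L) :
    -(PySem.Int.floordiv (-(n:Int)) (L:Int)) = (((n + L - 1) / L : Nat) : Int) := by
  rw [PySem.Int.neg_floordiv_neg_eq_iff_of_pos (show (0:Int) < (L:Int) by exact_mod_cast hL)]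
  obtain ⟨hq, hr⟩ := div_add_mod_int n L hL
  constructor
  · have hexp : ((((n + L - 1) / L : Nat) : Int) - 1) * L
        = (((n + L - 1) / L : Nat) : Int) * L - L := by ring
    rw [hexp]; linarith
  · linarith

theorem ceil_mul_ge (n L : Nat) (hL : 0 < L) : n ≤ ((n + L - 1) / L) * L := by
  obtain ⟨hq, hr⟩ := div_add_mod_int n L hL
  have : (n:Int) ≤ (((n + L - 1) / L : Nat) : Int) * L := by linarith
  exact_mod_cast this

theorem pad_eq_repeat_slice (s : List Int) (hs : s ≠ []) (n : Nat) :
    (List.range n).foldl (fun acc i => acc ++ [s.getD (i % s.length) 0]) []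
      = PySem.List.slice (PySem.List.pyRepeat s (-(PySem.Int.floordiv (-(n:Int)) (s.length:Int)))) none (some (n:Int)) := by
  have hL : 0 < s.length := List.length_pos_iff.mpr hs
  set L := s.length with hLdef
  set k : Nat := (n + L - 1) / L with hk
  have hceil := ceil_spec n L hL
  rw [PySem.List.foldl_append_singleton_eq_map, List.nil_append, hceil]
  have hrep : PySem.List.pyRepeat s ((k:Int)) = (List.replicate k s).flatten := by
    simp [PySem.List.pyRepeat]
  rw [hrep, PySem.List.slice_to_natCast]
  have hkL : n ≤ k * L := ceil_mul_ge n L hL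
  rw [← map_mod_range_mul s k, ← List.map_take, List.take_range]
  rw [← hLdef, Nat.min_eq_left hkL]

-- ===== VERDICT (by name: the statement is the Claim_ definition above) =====
theorem equal_length_spec : Claim_equal_equal_length := by
  intro s b _ hpre
  unfold Spec_equal_length equal_length_alt
  by_cases hle : s.length ≤ b.length
  · rw [equal_length]
    rw [if_neg (by omega), if_pos hle]
    by_cases hb : b = []
    · have hs : s = [] := hpre.mpr hb
      subst hs hb
      simp
    · have hs : s ≠ [] := fun h => hb (hpre.mp h)
      have hn : ((b.length : Int)) ≠ 0 := by
        simpa using hb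
      rw [if_neg hn]
      exact Prod.ext (pad_eq_repeat_slice s hs b.length) rfl
  · have hlt : b.length < s.length := by omega
    have hs : s ≠ [] := by intro h; subst h; simp at hlt
    have hb : b ≠ [] := fun h => by
      have : s = [] := hpre.mpr h
      exact hs this
    rw [equal_length, if_pos hlt, equal_length, if_neg (by omega)]
    rw [if_neg (by omega)]
    exact Prod.ext rfl (pad_eq_repeat_slice b hb s.length)
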